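-- pv_equiv track=rewrite | github.com/Jianxun/ASDL | src/asdl/docs/docstrings.py | _extract_file_docstring
-- ===== SOURCE A (Python) =====
-- from typing import Iterable, Optional
--
-- def _extract_file_docstring(yaml_content: str) -> Optional[str]:
--     lines = yaml_content.splitlines()
--     index = 0
--     while index < len(lines) and lines[index].strip() == "":
--         index += 1
--     if index >= len(lines) or not lines[index].lstrip().startswith("#"):
--         return None
--
--     comment_lines: list[str] = []
--     while index < len(lines) and lines[index].lstrip().startswith("#"):
--         comment_lines.append(lines[index])
--         index += 1
--
--     return _normalize_comment_lines(comment_lines)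
--
-- def _normalize_comment_lines(lines: Iterable[str]) -> Optional[str]:
--     normalized: list[str] = []
--     for line in lines:
--         stripped = line.lstrip()
--         if not stripped.startswith("#"):
--             continue
--         text = stripped[1:]
--         if text.startswith(" "):
--             text = text[1:]
--         normalized.append(text.rstrip())
--
--     while normalized and normalized[0].strip() == "":
--         normalized.pop(0)
--     while normalized and normalized[-1].strip() == "":
--         normalized.pop()
--
--     if not normalized:
--         return None
--     return "\n".join(normalized)
-- ===== SOURCE B (Python) =====
-- from typing import Optional
--
-- def _extract_file_docstring(yaml_content: str) -> Optional[str]: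
--     lines = yaml_content.splitlines()
--     rest = lines[next((i for i, l in enumerate(lines) if l.strip() != ""), len(lines)):]
--     block = []
--     for l in rest:
--         if not l.lstrip().startswith("#"):
--             break
--         block.append(l.lstrip()[1:])
--     if not block:
--         return None
--     texts = [(t[1:] if t.startswith(" ") else t).rstrip() for t in block]
--     nonblank = [i for i, t in enumerate(texts) if t.strip() != ""]
--     if not nonblank:
--         return None
--     return "\n".join(texts[nonblank[0]:nonblank[-1] + 1])
-- ===== Notes on version B (the rewrite author's own statement) =====
-- stated objective: alternative
-- what changed: B fuses A's two passes (block extraction then the separate _normalize helper with its while-pop trimming loops) into one traversal that strips the hash marker while collecting the block and trims blank edges by slicing between the first and last non-blank indices found via enumerate.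
import Mathlib
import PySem

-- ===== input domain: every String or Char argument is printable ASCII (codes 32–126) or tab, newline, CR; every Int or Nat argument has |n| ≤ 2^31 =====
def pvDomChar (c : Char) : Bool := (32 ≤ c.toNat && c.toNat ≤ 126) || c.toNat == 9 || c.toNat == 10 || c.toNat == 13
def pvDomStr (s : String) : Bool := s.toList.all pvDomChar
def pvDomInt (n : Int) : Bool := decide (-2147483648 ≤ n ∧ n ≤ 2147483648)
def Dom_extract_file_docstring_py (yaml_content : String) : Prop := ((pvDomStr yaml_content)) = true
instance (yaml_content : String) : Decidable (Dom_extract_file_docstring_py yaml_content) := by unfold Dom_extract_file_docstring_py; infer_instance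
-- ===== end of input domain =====

-- B fuses A's two passes (block extraction + the _normalize helper) into one traversal that
-- strips the '#' while collecting the block and trims blank edges by slicing between the first
-- and last non-blank indices; same return value on every input (objective: alternative decomposition).

-- ===== PORT A =====
-- while index < len(lines) and lines[index].strip() == "": index += 1   (A's first loop)
def pvSkipBlank : List String → List String
  | [] => []
  | l :: ls => if PySem.Str.strip l == "" then pvSkipBlank ls else l :: ls

-- while index < len(lines) and lines[index].lstrip().startswith("#"): append; index += 1
def pvTakeComments : List String → List String
  | [] => []
  | l :: ls =>
    if PySem.Str.startswith (PySem.Str.lstrip l) "#" then l :: pvTakeComments ls else []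

-- while normalized and normalized[0].strip() == "": normalized.pop(0)
def pvPopLeading : List String → List String
  | [] => []
  | l :: ls => if PySem.Str.strip l == "" then pvPopLeading ls else l :: ls

-- while normalized and normalized[-1].strip() == "": normalized.pop()
def pvPopTrailing (l : List String) : List String :=
  match h : l.getLast? with
  | none => l
  | some x => if PySem.Str.strip x == "" then pvPopTrailing l.dropLast else l
  termination_by l.length
  decreasing_by
    have : l ≠ [] := by intro hnil; simp [hnil] at h
    simpa [List.length_dropLast] using Nat.sub_lt (List.length_pos_iff.mpr this) one_pos

-- _normalize_comment_lines
def pvNormalize (ls : List String) : Option String :=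
  let normalized := ls.foldl (fun acc line =>
    let stripped := PySem.Str.lstrip line
    if !(PySem.Str.startswith stripped "#") then acc
    else
      let text := PySem.Str.slice stripped (some 1) none
      let text := if PySem.Str.startswith text " " then PySem.Str.slice text (some 1) none else text
      acc ++ [PySem.Str.rstrip text]) []
  let normalized := pvPopLeading normalized
  let normalized := pvPopTrailing normalized
  if normalized = [] then none else some (PySem.Str.join "\n" normalized)

def extract_file_docstring_py (yaml_content : String) : Option String :=
  let lines := PySem.Str.splitlines yaml_content
  let rest := pvSkipBlank lines
  match rest with
  | [] => none
  | l :: _ =>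
    if !(PySem.Str.startswith (PySem.Str.lstrip l) "#") then none
    else pvNormalize (pvTakeComments rest)

-- ===== PORT B =====
-- for l in rest: if not l.lstrip().startswith("#"): break; block.append(l.lstrip()[1:])
def pvAltBlock : List String → List String
  | [] => []
  | l :: ls =>
    if !(PySem.Str.startswith (PySem.Str.lstrip l) "#") then []
    else PySem.Str.slice (PySem.Str.lstrip l) (some 1) none :: pvAltBlock ls

def extract_file_docstring_py_alt (yaml_content : String) : Option String :=
  let lines := PySem.Str.splitlines yaml_content
  -- rest = lines[next((i for i, l in enumerate(lines) if l.strip() != ""), len(lines)):]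
  let rest := lines.drop (lines.findIdx (fun l => !(PySem.Str.strip l == "")))
  let block := pvAltBlock rest
  if block = [] then none
  else
    let texts := block.map (fun t =>
      PySem.Str.rstrip (if PySem.Str.startswith t " " then PySem.Str.slice t (some 1) none else t))
    let nonblank := (PySem.List.enumerate texts 0).filter (fun it => !(PySem.Str.strip it.2 == ""))
    match nonblank with
    | [] => none
    | i0 :: r =>
      some (PySem.Str.join "\n"
        (PySem.List.slice texts (some i0.1) (some (((i0 :: r).getLast (by simp)).1 + 1))))

-- ===== PRECONDITION & SPEC =====
def Spec_extract_file_docstring_py (yaml_content : String) (out : Option String) : Prop := out = extract_file_docstring_py_alt yaml_content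
instance (yaml_content : String) (out : Option String) : Decidable (Spec_extract_file_docstring_py yaml_content out) := by unfold Spec_extract_file_docstring_py; infer_instance

-- ===== CLAIM (what is proved, stated in full; the proofs are below) =====
def Claim_equal_extract_file_docstring_py : Prop := ∀ (yaml_content : String), Dom_extract_file_docstring_py yaml_content → Spec_extract_file_docstring_py yaml_content (extract_file_docstring_py yaml_content)

-- ===== LEMMAS AND PROOFS =====

-- the blank-line test, shared shape of both programs
def pvBlank (s : String) : Bool := PySem.Str.strip s == ""

lemma pvSkipBlank_eq_dropWhile (ls : List String) : pvSkipBlank ls = ls.dropWhile pvBlank := by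
  induction ls with
  | nil => rfl
  | cons l ls ih => simp [pvSkipBlank, List.dropWhile_cons, pvBlank]; split <;> simp [ih]

lemma pvPopLeading_eq_dropWhile (ls : List String) : pvPopLeading ls = ls.dropWhile pvBlank := by
  induction ls with
  | nil => rfl
  | cons l ls ih => simp [pvPopLeading, List.dropWhile_cons, pvBlank]; split <;> simp [ih]

lemma drop_findIdx_eq_dropWhile (ls : List String) :
    ls.drop (ls.findIdx (fun l => !(PySem.Str.strip l == ""))) = ls.dropWhile pvBlank := by
  induction ls with
  | nil => rfl
  | cons l ls ih =>
    by_cases h : (PySem.Str.strip l == "") = true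
    · simpa [List.findIdx_cons, List.dropWhile_cons, pvBlank, h] using ih
    · simp only [Bool.not_eq_true] at h
      simp [List.findIdx_cons, List.dropWhile_cons, pvBlank, h]

-- A's comment predicate
def pvIsComment (s : String) : Bool := PySem.Str.startswith (PySem.Str.lstrip s) "#"

lemma pvTakeComments_eq_takeWhile (ls : List String) :
    pvTakeComments ls = ls.takeWhile pvIsComment := by
  induction ls with
  | nil => rfl
  | cons l ls ih => simp [pvTakeComments, List.takeWhile_cons, pvIsComment]; split <;> simp [ih]

-- B's fused block loop = A's block followed by B's per-line strip
def pvStripHash (l : String) : String := PySem.Str.slice (PySem.Str.lstrip l) (some 1) none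

lemma pvAltBlock_eq_map_takeWhile (ls : List String) :
    pvAltBlock ls = (ls.takeWhile pvIsComment).map pvStripHash := by
  induction ls with
  | nil => rfl
  | cons l ls ih =>
    by_cases h : PySem.Str.startswith (PySem.Str.lstrip l) "#" = true
    · simp only [pvAltBlock, List.takeWhile_cons, pvIsComment, h, Bool.not_true, Bool.false_eq_true,
        if_false, if_true]
      simp [pvStripHash, ih]
    · simp only [Bool.not_eq_true] at h
      simp only [pvAltBlock, List.takeWhile_cons, pvIsComment, h, Bool.not_false, Bool.true_eq_false,
        if_true, if_false]
      simp

-- A's normalize text transform (after the '#' is gone)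
def pvNormText (t : String) : String :=
  PySem.Str.rstrip (if PySem.Str.startswith t " " then PySem.Str.slice t (some 1) none else t)

-- A's foldl builds exactly the map, when every line is a comment line
lemma pvNormalize_foldl_eq_map (ls : List String) (h : ∀ l ∈ ls, pvIsComment l = true)
    (acc : List String) :
    ls.foldl (fun acc line =>
      let stripped := PySem.Str.lstrip line
      if !(PySem.Str.startswith stripped "#") then acc
      else
        let text := PySem.Str.slice stripped (some 1) none
        let text := if PySem.Str.startswith text " " then PySem.Str.slice text (some 1) none else text
        acc ++ [PySem.Str.rstrip text]) acc = acc ++ ls.map (fun l => pvNormText (pvStripHash l)) := by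
  induction ls generalizing acc with
  | nil => simp
  | cons l ls ih =>
    have hl : pvIsComment l = true := h l (by simp)
    simp only [List.foldl_cons, List.map_cons]
    rw [show (PySem.Str.startswith (PySem.Str.lstrip l) "#") = true from hl]
    rw [ih (fun x hx => h x (by simp [hx]))]
    simp [pvNormText, pvStripHash]

-- trailing pop over an all-blank suffix
lemma pvPopTrailing_append_blank (m w : List String) (hw : ∀ x ∈ w, pvBlank x = true) :
    pvPopTrailing (m ++ w) = pvPopTrailing m := by
  induction w using List.reverseRecOn with
  | nil => rw [List.append_nil]
  | append_singleton w x ih =>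
    have hx : pvBlank x = true := hw x (by simp)
    rw [show m ++ (w ++ [x]) = (m ++ w) ++ [x] by simp, pvPopTrailing]
    split
    · rename_i hnone; simp at hnone
    · rename_i y hy
      rw [List.getLast?_concat] at hy
      obtain rfl : x = y := by simpa using hy
      rw [if_pos (by simpa [pvBlank] using hx), List.dropLast_concat]
      exact ih (fun z hz => hw z (by simp [hz]))

-- trailing pop stops at a non-blank last element
lemma pvPopTrailing_of_last_not (m : List String) (hm : m ≠ [])
    (hl : pvBlank (m.getLast hm) = false) : pvPopTrailing m = m := by
  rw [pvPopTrailing]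
  split
  · rfl
  · rename_i y hy
    rw [List.getLast?_eq_some_getLast hm] at hy
    obtain rfl : y = m.getLast hm := by simpa using hy.symm
    rw [if_neg (by simpa [pvBlank] using hl)]

-- dropWhile passes an all-true prefix
lemma pv_dropWhile_append_all {p : String → Bool} (u v : List String) (hu : ∀ x ∈ u, p x = true) :
    (u ++ v).dropWhile p = v.dropWhile p := by
  induction u with
  | nil => rfl
  | cons a u ih =>
    rw [List.cons_append, List.dropWhile_cons, if_pos (hu a (by simp))]
    exact ih (fun x hx => hu x (by simp [hx]))

-- the enumerate-filter of an all-blank list is empty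
lemma pv_filter_enumerate_blank (xs : List String) (s : Int) (h : ∀ x ∈ xs, pvBlank x = true) :
    (PySem.List.enumerate xs s).filter (fun it => !(pvBlank it.2)) = [] := by
  rw [List.filter_eq_nil_iff]
  intro it hit
  obtain ⟨k, hk, rfl⟩ := (PySem.List.mem_enumerate_iff xs s it).mp hit
  simp [h xs[k] (List.getElem_mem hk)]

-- the core trimming lemma: A's pop-front/pop-back on ts equals m, and B's enumerate-filter
-- slice picks exactly m, whenever ts = u ++ m ++ w with blank u w and non-blank ends of m
lemma pv_trim_core (u m w : List String) (hm : m ≠ [])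
    (hu : ∀ x ∈ u, pvBlank x = true) (hw : ∀ x ∈ w, pvBlank x = true)
    (hh : pvBlank (m.head hm) = false) (hl : pvBlank (m.getLast hm) = false) :
    pvPopTrailing (pvPopLeading (u ++ m ++ w)) = m ∧
    ∃ r, (PySem.List.enumerate (u ++ m ++ w) 0).filter (fun it => !(pvBlank it.2)) =
        ((u.length : Int), m.head hm) :: r ∧
      PySem.List.slice (u ++ m ++ w)
        (some (u.length : Int))
        (some (((((u.length : Int), m.head hm) :: r).getLast (by simp)).1 + 1)) = m := by
  obtain ⟨mh, mt, rfl⟩ : ∃ mh mt, m = mh :: mt := by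
    cases m with | nil => exact absurd rfl hm | cons a b => exact ⟨a, b, rfl⟩
  simp only [List.head_cons] at hh ⊢
  constructor
  · rw [pvPopLeading_eq_dropWhile, List.append_assoc,
      pv_dropWhile_append_all u ((mh :: mt) ++ w) hu, List.cons_append, List.dropWhile_cons,
      if_neg (by simpa [pvBlank] using hh)]
    rw [show mh :: (mt ++ w) = (mh :: mt) ++ w from by simp]
    rw [pvPopTrailing_append_blank _ w hw]
    exact pvPopTrailing_of_last_not _ hm hl
  · -- decompose m from the right as well
    obtain ⟨m', y, hmy⟩ : ∃ m' y, mh :: mt = m' ++ [y] := ⟨(mh :: mt).dropLast, (mh :: mt).getLast hm,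
      (List.dropLast_concat_getLast hm).symm⟩
    -- the filtered enumerate of the middle block, bracketed by empty contributions
    have henum : (PySem.List.enumerate (u ++ (mh :: mt) ++ w) 0).filter (fun it => !(pvBlank it.2)) =
        (PySem.List.enumerate (mh :: mt) (u.length : Int)).filter (fun it => !(pvBlank it.2)) := by
      rw [List.append_assoc, PySem.List.enumerate_append, PySem.List.enumerate_append,
        List.filter_append, List.filter_append, pv_filter_enumerate_blank u _ hu,
        pv_filter_enumerate_blank w _ hw]
      simp
    have hcons : (PySem.List.enumerate (mh :: mt) (u.length : Int)).filter (fun it => !(pvBlank it.2)) =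
        ((u.length : Int), mh) ::
          (PySem.List.enumerate mt ((u.length : Int) + 1)).filter (fun it => !(pvBlank it.2)) := by
      rw [PySem.List.enumerate_cons, List.filter_cons, if_pos (by simpa [pvBlank] using hh)]
    refine ⟨(PySem.List.enumerate mt ((u.length : Int) + 1)).filter (fun it => !(pvBlank it.2)),
      henum.trans hcons, ?_⟩
    -- the last element of the filtered list
    have hlastlist : (PySem.List.enumerate (mh :: mt) (u.length : Int)).filter (fun it => !(pvBlank it.2)) =
        ((PySem.List.enumerate m' (u.length : Int)).filter (fun it => !(pvBlank it.2))) ++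
          [((u.length : Int) + (m'.length : Int), y)] := by
      rw [hmy, PySem.List.enumerate_append, List.filter_append]
      congr 1
      have hy : pvBlank y = false := by
        have : y = (mh :: mt).getLast hm := by
          have h2 := (List.getLast?_concat (l := m') (a := y))
          rw [← hmy, List.getLast?_eq_some_getLast hm] at h2
          exact (Option.some.inj h2).symm
        rw [this]; exact hl
      simp [PySem.List.enumerate, hy]
    have hgl : (((u.length : Int), mh) ::
        (PySem.List.enumerate mt ((u.length : Int) + 1)).filter (fun it => !(pvBlank it.2))).getLast
          (by simp) = ((u.length : Int) + (m'.length : Int), y) := by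
      have h3 := hcons.symm.trans hlastlist
      have h4 : (((u.length : Int), mh) ::
          (PySem.List.enumerate mt ((u.length : Int) + 1)).filter (fun it => !(pvBlank it.2))).getLast? =
          some ((u.length : Int) + (m'.length : Int), y) := by
        rw [h3, List.getLast?_concat]
      rw [List.getLast?_eq_some_getLast (by simp)] at h4
      exact (Option.some.inj h4.symm).symm
    rw [hgl]
    have hb : ((u.length : Int) + (m'.length : Int)) + 1 = ((u.length + m'.length + 1 : Nat) : Int) := by
      push_cast; ring
    rw [hb, PySem.List.slice_natCast, show u.length + m'.length + 1 - u.length = m'.length + 1 by omega]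
    rw [List.append_assoc, List.drop_left, hmy]
    rw [List.take_left' (by simp : (m' ++ [y]).length = m'.length + 1)]

-- the all-blank case
lemma pv_trim_blank (ts : List String) (h : ∀ x ∈ ts, pvBlank x = true) :
    pvPopTrailing (pvPopLeading ts) = [] ∧
    (PySem.List.enumerate ts 0).filter (fun it => !(pvBlank it.2)) = [] := by
  constructor
  · rw [pvPopLeading_eq_dropWhile, List.dropWhile_eq_nil_iff.mpr h, pvPopTrailing]
    rfl
  · exact pv_filter_enumerate_blank ts 0 h

-- the normalized middle stage: both programs agree from the comment block onwards
lemma pv_tail_stage (bk : List String) (hbk : ∀ l ∈ bk, pvIsComment l = true) :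
    pvNormalize bk = (match (PySem.List.enumerate (bk.map (fun l => pvNormText (pvStripHash l))) 0).filter
        (fun it => !(pvBlank it.2)) with
      | [] => none
      | i0 :: r => some (PySem.Str.join "\n"
          (PySem.List.slice (bk.map (fun l => pvNormText (pvStripHash l))) (some i0.1)
            (some (((i0 :: r).getLast (by simp)).1 + 1))))) := by
  set ts := bk.map (fun l => pvNormText (pvStripHash l)) with hts
  have hfold : pvNormalize bk = (if pvPopTrailing (pvPopLeading ts) = [] then none
      else some (PySem.Str.join "\n" (pvPopTrailing (pvPopLeading ts)))) := by
    unfold pvNormalize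
    rw [pvNormalize_foldl_eq_map bk hbk []]
    simp only [List.nil_append]
    rw [← hts]
  rw [hfold]
  by_cases hall : ∀ x ∈ ts, pvBlank x = true
  · obtain ⟨h1, h2⟩ := pv_trim_blank ts hall
    rw [h1, h2]
    simp
  · -- decompose ts = u ++ m ++ w
    have hd : ts.dropWhile pvBlank ≠ [] := by
      intro hnil
      exact hall (List.dropWhile_eq_nil_iff.mp hnil)
    have hmne : ((ts.dropWhile pvBlank).rdropWhile pvBlank) ≠ [] := by
      intro hnil
      have hall2 := List.rdropWhile_eq_nil_iff.mp hnil
      have := hall2 ((ts.dropWhile pvBlank).head hd) (List.head_mem hd)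
      rw [List.head_dropWhile_not pvBlank hd] at this
      exact Bool.false_ne_true this
    have hts2 : ts = ts.takeWhile pvBlank ++ (ts.dropWhile pvBlank).rdropWhile pvBlank ++
        (ts.dropWhile pvBlank).rtakeWhile pvBlank := by
      rw [List.append_assoc, List.rdropWhile_append_rtakeWhile, List.takeWhile_append_dropWhile]
    have hh : pvBlank (((ts.dropWhile pvBlank).rdropWhile pvBlank).head hmne) = false := by
      have h1 : (ts.dropWhile pvBlank).head? =
          some (((ts.dropWhile pvBlank).rdropWhile pvBlank).head hmne) := by
        conv_lhs => rw [← List.rdropWhile_append_rtakeWhile (p := pvBlank) (l := ts.dropWhile pvBlank)]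
        rw [List.head?_append, List.head?_eq_head hmne]
        rfl
      have h2 : (ts.dropWhile pvBlank).head? = some ((ts.dropWhile pvBlank).head hd) :=
        List.head?_eq_head hd
      have h3 := Option.some.inj (h1.symm.trans h2)
      rw [h3, List.head_dropWhile_not pvBlank hd]
    have hl : pvBlank (((ts.dropWhile pvBlank).rdropWhile pvBlank).getLast hmne) = false := by
      have := List.rdropWhile_last_not pvBlank (ts.dropWhile pvBlank) hmne
      exact Bool.not_eq_true _ ▸ (by simpa using this)
    obtain ⟨hA, r, he, hslice⟩ := pv_trim_core (ts.takeWhile pvBlank)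
      ((ts.dropWhile pvBlank).rdropWhile pvBlank) ((ts.dropWhile pvBlank).rtakeWhile pvBlank)
      hmne (fun x hx => List.mem_takeWhile_imp hx) (fun x hx => List.mem_rtakeWhile_imp hx) hh hl
    rw [← hts2] at hA he hslice
    rw [hA, if_neg hmne, he]
    dsimp only []
    rw [hslice]

-- ===== VERDICT (by name: the statement is the Claim_ definition above) =====
theorem extract_file_docstring_py_spec : Claim_equal_extract_file_docstring_py := by
  intro y _h
  unfold Spec_extract_file_docstring_py
  simp only [extract_file_docstring_py, extract_file_docstring_py_alt]
  rw [drop_findIdx_eq_dropWhile, ← pvSkipBlank_eq_dropWhile]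
  cases hrest : pvSkipBlank (PySem.Str.splitlines y) with
  | nil => simp [pvAltBlock]
  | cons l t =>
    dsimp only []
    rw [pvTakeComments_eq_takeWhile, pvAltBlock_eq_map_takeWhile]
    by_cases hc : pvIsComment l = true
    · have hc' : PySem.Str.startswith (PySem.Str.lstrip l) "#" = true := hc
      have hbk : List.takeWhile pvIsComment (l :: t) = l :: List.takeWhile pvIsComment t := by
        rw [List.takeWhile_cons, if_pos hc]
      rw [hc', hbk]
      simp only [Bool.not_true, Bool.false_eq_true, if_false]
      rw [if_neg (by simp), List.map_map]
      rw [pv_tail_stage (l :: List.takeWhile pvIsComment t)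
        (by intro x hx
            rcases List.mem_cons.mp hx with hx | hx
            · exact hx ▸ hc
            · exact List.mem_takeWhile_imp hx)]
      simp only [pvNormText, pvStripHash, pvBlank, Function.comp_def]
    · have hc' : PySem.Str.startswith (PySem.Str.lstrip l) "#" = false := by
        simpa [pvIsComment] using hc
      have hbk : List.takeWhile pvIsComment (l :: t) = [] := by
        rw [List.takeWhile_cons, if_neg hc]
      rw [hc', hbk]
      simp
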